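-- pv_equiv track=rewrite | github.com/askyellow/askyellow-staging | ask_handler.py | reduce_products
-- ===== SOURCE A (Python) =====
-- def reduce_products(products, constraints):
--     results = products
--
--     for key, value in constraints.items():
--         results = [
--             p for p in results
--             if p.get("facets", {}).get(key) == value
--         ]
--
--     return results
-- ===== SOURCE B (Python) =====
-- def reduce_products(products, constraints):
--     items = list(constraints.items())
--
--     def satisfies(p, remaining):
--         if not remaining:
--             return True
--         key, value = remaining[0]
--         if p.get("facets", {}).get(key) != value:
--             return False
--         return satisfies(p, remaining[1:])
--
--     def go(ps):
--         if not ps: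
--             return []
--         head, tail = ps[0], ps[1:]
--         rest = go(tail)
--         return [head] + rest if satisfies(head, items) else rest
--
--     return go(products)
-- ===== Notes on version B (the rewrite author's own statement) =====
-- stated objective: alternative
-- what changed: B replaces A's staged re-filtering (one list rebuild per constraint) by structural recursion over products with a short-circuiting recursive constraint check per product, building the result by consing.
import Mathlib
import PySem

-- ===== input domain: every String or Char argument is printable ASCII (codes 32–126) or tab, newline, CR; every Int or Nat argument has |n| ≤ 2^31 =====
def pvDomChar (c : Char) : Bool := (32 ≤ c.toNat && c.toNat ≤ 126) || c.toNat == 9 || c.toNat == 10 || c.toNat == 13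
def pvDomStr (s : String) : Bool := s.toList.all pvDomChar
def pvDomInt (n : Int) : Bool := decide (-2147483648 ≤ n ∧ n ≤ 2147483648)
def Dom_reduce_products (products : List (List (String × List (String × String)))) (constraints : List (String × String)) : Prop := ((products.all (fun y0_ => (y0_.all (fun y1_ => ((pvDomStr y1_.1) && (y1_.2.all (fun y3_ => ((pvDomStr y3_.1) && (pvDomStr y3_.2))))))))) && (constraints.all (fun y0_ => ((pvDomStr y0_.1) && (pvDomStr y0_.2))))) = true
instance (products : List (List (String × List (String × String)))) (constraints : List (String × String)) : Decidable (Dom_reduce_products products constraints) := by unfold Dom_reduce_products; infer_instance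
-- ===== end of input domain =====

-- B: recursion over products with a short-circuiting recursive constraint check, instead of A's one list rebuild per constraint (alternative decomposition; return value only).

-- dict.get(k): first match in the association list (shared dict-lookup primitive, used by both ports)
def pvGetKV (d : List (String × String)) (k : String) : Option String :=
  (d.find? (fun kv => kv.1 == k)).map (·.2)

-- p.get("facets", {}): first match, default empty dict
def pvFacets (p : List (String × List (String × String))) : List (String × String) :=
  ((p.find? (fun kv => kv.1 == "facets")).map (·.2)).getD []

-- ===== PORT A =====
-- results = products; for key, value in constraints.items(): results = [p for p in results if p.get("facets", {}).get(key) == value]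
def reduce_products (products : List (List (String × List (String × String)))) (constraints : List (String × String)) : List (List (String × List (String × String))) :=
  constraints.foldl
    (fun results kv => results.filter (fun p => pvGetKV (pvFacets p) kv.1 == some kv.2))
    products

-- ===== PORT B =====
-- satisfies(p, remaining): empty → True; first constraint fails → False; else recurse on the tail
def pvSatisfies (p : List (String × List (String × String))) : List (String × String) → Bool
  | [] => true
  | (k, v) :: rest =>
      if pvGetKV (pvFacets p) k ≠ some v then false
      else pvSatisfies p rest

-- go(ps): structural recursion over products, consing head onto the recursive result when it satisfies all constraints
def pvGo (constraints : List (String × String)) : List (List (String × List (String × String))) → List (List (String × List (String × String)))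
  | [] => []
  | head :: tail =>
      let rest := pvGo constraints tail
      if pvSatisfies head constraints then head :: rest else rest

def reduce_products_alt (products : List (List (String × List (String × String)))) (constraints : List (String × String)) : List (List (String × List (String × String))) :=
  pvGo constraints products

-- ===== PRECONDITION & SPEC =====
def Spec_reduce_products (products : List (List (String × List (String × String)))) (constraints : List (String × String)) (out : List (List (String × List (String × String)))) : Prop := out = reduce_products_alt products constraints
instance (products : List (List (String × List (String × String)))) (constraints : List (String × String)) (out : List (List (String × List (String × String)))) : Decidable (Spec_reduce_products products constraints out) := by unfold Spec_reduce_products; infer_instance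

-- ===== CLAIM (what is proved, stated in full; the proofs are below) =====
def Claim_equal_reduce_products : Prop := ∀ (products : List (List (String × List (String × String)))) (constraints : List (String × String)), Dom_reduce_products products constraints → Spec_reduce_products products constraints (reduce_products products constraints)

-- ===== LEMMAS AND PROOFS =====
-- the short-circuiting recursive check is the conjunction of all per-constraint checks
theorem pvSatisfies_eq_all (p : List (String × List (String × String))) :
    ∀ cs : List (String × String),
      pvSatisfies p cs = cs.all (fun kv => pvGetKV (pvFacets p) kv.1 == some kv.2) := by
  intro cs
  induction cs with
  | nil => rfl
  | cons c cs ih =>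
      obtain ⟨k, v⟩ := c
      by_cases h : pvGetKV (pvFacets p) k = some v <;>
        simp [pvSatisfies, ih, h]

-- structural recursion with cons = filter
theorem pvGo_eq_filter (cs : List (String × String)) :
    ∀ ps, pvGo cs ps = ps.filter (fun p => pvSatisfies p cs) := by
  intro ps
  induction ps with
  | nil => rfl
  | cons p ps ih => simp [pvGo, ih, List.filter_cons]

-- sequential filtering by each constraint = one filter by the conjunction of all constraints
theorem foldl_filter_eq_filter_all {α β : Type} (pred : β → α → Bool) :
    ∀ (cs : List β) (xs : List α),
      cs.foldl (fun acc kv => acc.filter (pred kv)) xs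
        = xs.filter (fun x => cs.all (fun kv => pred kv x)) := by
  intro cs
  induction cs with
  | nil => intro xs; simp
  | cons c cs ih =>
      intro xs
      simp [List.foldl_cons, ih, List.filter_filter, List.all_cons, Bool.and_comm]

-- ===== VERDICT (by name: the statement is the Claim_ definition above) =====
theorem reduce_products_spec : Claim_equal_reduce_products := by
  intro products constraints _
  unfold Spec_reduce_products reduce_products reduce_products_alt
  rw [foldl_filter_eq_filter_all, pvGo_eq_filter]
  exact List.filter_congr (fun p _ => by rw [pvSatisfies_eq_all])
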